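-- pv_equiv track=rewrite | github.com/andrmuel/ace | ace/basisfunctions/rulecomponents.py | within_any
-- ===== SOURCE A (Python) =====
-- def within_any(events, timeframe):
-- 	"""
-- 	Checks, whether there is a combination with at least one event from each group in
-- 	the events list within a time window of the given length.
--
-- 	@param events: list of lists with event timestamps
-- 	@param timeframe: window length
-- 	"""
-- 	# Explanation (w = window length):
-- 	#  1. At the start, we check, whether any group is empty, and the individual
-- 	#     groups are sorted (this is simply to speed up things later)
-- 	#  2. then we start with a window beginning with the first event (earlier
-- 	#     makes no sense)
-- 	#  3. Then, we look at the earliest event from each group and take the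
-- 	#     latest of them (time: tmax)
-- 	#  4. If this event is within the window, we win (i.e. wo found a set
-- 	#     within the window)
-- 	#  5. Otherwise, we know, that we cannot start the window before tmax-w, as
-- 	#     otherwise we would not have an event from the group with the event at
-- 	#     tmax => new tmin=tmax-w
-- 	#  6. We can discard all events from each group, which lie before tmin. If
-- 	#     any group has no events left, we lose; otherwise we continue at 2.
-- 	#
-- 	# Speed considerations: in each round, we either win (if at least one event
-- 	# from each group is within the window), or we can remove at least one
-- 	# event (as at least one event from one group is not within the window, the
-- 	# window advances and we can certainly remove the event at the previous
-- 	# start of the window). The worst case is thus O(n) rounds (n: total number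
-- 	# of events) with a round complexity O(m) (m: number of groups). Total
-- 	# complexity is thus O(m*n) in the worst case; with a much better average
-- 	# complexity (e.g. if the events are bursty, or one group has only few
-- 	# events).
-- 	#
-- 	# Another possibility would be to recursively check (for each event
-- 	# matching the first query) the nearest earlier and later event matching
-- 	# subsequent queries. While this would be faster for few queries, it would
-- 	# have an exponential complexity O(2^n), with n being the number of queries.
-- 	for group in events:
-- 		if len(group) == 0:
-- 			return False
-- 		group.sort()
-- 	while True:
-- 		tmin = min([group[0] for group in events])
-- 		tmax = max([group[0] for group in events])
-- 		if tmax <= tmin+timeframe: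
-- 			return True
-- 		tmin = tmax-timeframe
-- 		for group in events:
-- 			while group[0] < tmin:
-- 				group.pop(0)
-- 				if len(group) == 0:
-- 					return False
-- ===== SOURCE B (Python) =====
-- def within_any(events, timeframe):
-- 	"""
-- 	Checks, whether there is a combination with at least one event from each group in
-- 	the events list within a time window of the given length.
--
-- 	Declarative reformulation: a qualifying combination exists iff some event t
-- 	(the latest event of the combination) is such that every group has an event
-- 	in the closed window [t - timeframe, t].  So just scan all events as window
-- 	ends and test each group directly; no sorting and no mutation of the input.
-- 	"""
-- 	return any(
-- 		all(any(t - timeframe <= x <= t for x in group) for group in events)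
-- 		for cand_group in events for t in cand_group
-- 	)
-- ===== Notes on version B (the rewrite author's own statement) =====
-- stated objective: simpler
-- what changed: A's sort-then-advance-the-window loop with destructive pop(0) is replaced by a declarative double scan: some event t is the window end iff every group has an event in [t-timeframe, t]; B does not mutate the input. Pre_ excludes only events == [], where A raises ValueError (min of an empty sequence).
import Mathlib
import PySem

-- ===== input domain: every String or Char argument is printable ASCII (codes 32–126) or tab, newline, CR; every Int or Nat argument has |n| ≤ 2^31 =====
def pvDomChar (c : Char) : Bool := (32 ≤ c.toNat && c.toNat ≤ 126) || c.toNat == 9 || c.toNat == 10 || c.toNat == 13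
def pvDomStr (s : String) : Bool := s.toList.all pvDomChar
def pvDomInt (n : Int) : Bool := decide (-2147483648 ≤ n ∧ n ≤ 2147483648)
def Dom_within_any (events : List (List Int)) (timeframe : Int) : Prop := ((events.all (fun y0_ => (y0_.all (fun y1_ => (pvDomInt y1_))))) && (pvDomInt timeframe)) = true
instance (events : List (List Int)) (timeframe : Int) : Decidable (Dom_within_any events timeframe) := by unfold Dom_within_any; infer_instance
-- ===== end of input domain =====

-- B replaces A's sort-then-advance-the-window loop (destructive pop(0)) by a declarative
-- double scan over window-end candidates; simpler, no mutation of the input (A sorts and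
-- pops its argument's groups in place — the equivalence proved here is about the return value).


-- ===== PORT A =====
-- 'for group in events: if len(group)==0: return False; group.sort()' —
-- none = the early 'return False' at the first empty group; otherwise the sorted groups.
def paSortGroups : List (List Int) → Option (List (List Int))
  | [] => some []
  | g :: gs =>
    if g.length == 0 then none
    else
      match paSortGroups gs with
      | none => none
      | some rest => some (PySem.List.sorted g (fun x => x) false :: rest)

-- 'while group[0] < tmin: group.pop(0); if len(group)==0: return False' —
-- none = that inner 'return False'; otherwise the remaining group.
def paPop (tmin : Int) : List Int → Option (List Int)
  | [] => none
  | x :: xs => if x < tmin then paPop tmin xs else some (x :: xs)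

-- 'for group in events: <inner while>'
def paPopAll (tmin : Int) : List (List Int) → Option (List (List Int))
  | [] => some []
  | g :: gs =>
    match paPop tmin g with
    | none => none
    | some g' =>
      match paPopAll tmin gs with
      | none => none
      | some gs' => some (g' :: gs')

-- 'while True: …' — fuel recursion; fuel = total number of events + 1 is enough because
-- every non-winning round pops at least one event (proved below for the theorem).
def paLoop (timeframe : Int) : Nat → List (List Int) → Bool
  | 0, _ => false
  | fuel + 1, gs =>
    match PySem.List.min? (gs.map (fun g => g.headD 0)) (fun x => x),
          PySem.List.max? (gs.map (fun g => g.headD 0)) (fun x => x) with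
    | some tmin, some tmax =>
      if tmax ≤ tmin + timeframe then true
      else
        match paPopAll (tmax - timeframe) gs with
        | none => false
        | some gs' => paLoop timeframe fuel gs'
    | _, _ => false

def within_any (events : List (List Int)) (timeframe : Int) : Bool :=
  match paSortGroups events with
  | none => false
  | some gs => paLoop timeframe ((gs.map List.length).sum + 1) gs

-- ===== PORT B =====
def within_any_alt (events : List (List Int)) (timeframe : Int) : Bool :=
  (events.flatMap (fun g => g)).any (fun t =>
    events.all (fun g => g.any (fun x => decide (t - timeframe ≤ x) && decide (x ≤ t))))

-- ===== PRECONDITION & SPEC =====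
-- Pre_ excludes exactly events = [], where A raises ValueError (min() of an empty sequence).
def Pre_within_any (events : List (List Int)) (timeframe : Int) : Prop := events ≠ []
instance (events : List (List Int)) (timeframe : Int) : Decidable (Pre_within_any events timeframe) := by unfold Pre_within_any; infer_instance

def pvWitness_within_any : List (List Int) × Int := ([[1, 5], [3]], 2)

def Spec_within_any (events : List (List Int)) (timeframe : Int) (out : Bool) : Prop := out = within_any_alt events timeframe
instance (events : List (List Int)) (timeframe : Int) (out : Bool) : Decidable (Spec_within_any events timeframe out) := by unfold Spec_within_any; infer_instance

-- ===== CLAIM (what is proved, stated in full; the proofs are below) =====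
def Claim_equal_within_any : Prop := ∀ (events : List (List Int)) (timeframe : Int), Dom_within_any events timeframe → Pre_within_any events timeframe → Spec_within_any events timeframe (within_any events timeframe)

-- ===== LEMMAS AND PROOFS =====

-- "Some event t is such that every group has an event in [t - tf, t]."
def Feas (gs : List (List Int)) (tf : Int) : Prop :=
  ∃ t, (∃ g ∈ gs, t ∈ g) ∧ ∀ g ∈ gs, ∃ x ∈ g, t - tf ≤ x ∧ x ≤ t

theorem alt_iff_feas (events : List (List Int)) (tf : Int) :
    within_any_alt events tf = true ↔ Feas events tf := by
  simp only [within_any_alt, Feas, List.any_eq_true, List.all_eq_true, List.mem_flatMap,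
    Bool.and_eq_true, decide_eq_true_eq]

theorem forall2_mem_left {α β : Type} {r : α → β → Prop} {as : List α} {bs : List β}
    (h : List.Forall₂ r as bs) {a : α} (ha : a ∈ as) : ∃ b ∈ bs, r a b := by
  induction h with
  | nil => cases ha
  | cons hr _ ih =>
    rcases List.mem_cons.mp ha with rfl | ha
    · exact ⟨_, List.mem_cons_self, hr⟩
    · rcases ih ha with ⟨b, hb, hrb⟩; exact ⟨b, List.mem_cons_of_mem _ hb, hrb⟩

theorem forall2_mem_right {α β : Type} {r : α → β → Prop} {as : List α} {bs : List β}
    (h : List.Forall₂ r as bs) {b : β} (hb : b ∈ bs) : ∃ a ∈ as, r a b := by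
  induction h with
  | nil => cases hb
  | cons hr _ ih =>
    rcases List.mem_cons.mp hb with rfl | hb
    · exact ⟨_, List.mem_cons_self, hr⟩
    · rcases ih hb with ⟨a, ha, hra⟩; exact ⟨a, List.mem_cons_of_mem _ ha, hra⟩

theorem feas_of_forall2_mem {as bs : List (List Int)} {tf : Int}
    (h : List.Forall₂ (fun a b => ∀ x : Int, x ∈ a ↔ x ∈ b) as bs) :
    Feas as tf ↔ Feas bs tf := by
  constructor
  · rintro ⟨t, ⟨g, hg, htg⟩, hall⟩
    rcases forall2_mem_left h hg with ⟨g', hg', hmem⟩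
    refine ⟨t, ⟨g', hg', (hmem t).mp htg⟩, ?_⟩
    intro b hb
    rcases forall2_mem_right h hb with ⟨a, ha, hmem'⟩
    rcases hall a ha with ⟨x, hx, h1, h2⟩
    exact ⟨x, (hmem' x).mp hx, h1, h2⟩
  · rintro ⟨t, ⟨g, hg, htg⟩, hall⟩
    rcases forall2_mem_right h hg with ⟨g', hg', hmem⟩
    refine ⟨t, ⟨g', hg', (hmem t).mpr htg⟩, ?_⟩
    intro a ha
    rcases forall2_mem_left h ha with ⟨b, hb, hmem'⟩
    rcases hall b hb with ⟨x, hx, h1, h2⟩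
    exact ⟨x, (hmem' x).mpr hx, h1, h2⟩

theorem paSortGroups_none {events : List (List Int)} (h : paSortGroups events = none) :
    ∃ g ∈ events, g = [] := by
  induction events with
  | nil => simp [paSortGroups] at h
  | cons g gs ih =>
    by_cases hg : g.length == 0
    · exact ⟨g, List.mem_cons_self, by simpa using hg⟩
    · simp only [paSortGroups, hg, Bool.false_eq_true, if_false] at h
      rcases hgs : paSortGroups gs with _ | rest
      · rcases ih hgs with ⟨g', hg', he⟩
        exact ⟨g', List.mem_cons_of_mem _ hg', he⟩
      · rw [hgs] at h; simp at h

theorem paSortGroups_some {events gs : List (List Int)} (h : paSortGroups events = some gs) :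
    List.Forall₂ (fun e g => (∀ x : Int, x ∈ e ↔ x ∈ g) ∧ g ≠ [] ∧ g.Pairwise (· ≤ ·)) events gs := by
  induction events generalizing gs with
  | nil => simp [paSortGroups] at h; simp [h]
  | cons e es ih =>
    by_cases he : e.length == 0
    · simp [paSortGroups, he] at h
    · simp only [paSortGroups, he, Bool.false_eq_true, if_false] at h
      rcases hes : paSortGroups es with _ | rest
      · rw [hes] at h; simp at h
      · rw [hes] at h
        simp only [Option.some.injEq] at h
        subst h
        refine List.Forall₂.cons ⟨?_, ?_, ?_⟩ (ih hes)
        · exact fun x => (PySem.List.mem_sorted e (fun x => x) false x).symm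
        · intro hnil
          rw [PySem.List.sorted_eq_nil_iff] at hnil
          subst hnil; simp at he
        · simpa using PySem.List.sorted_pairwise e (fun x => x)

-- paPop facts -----------------------------------------------------------------
theorem paPop_none {L : Int} {g : List Int} (h : paPop L g = none) : ∀ y ∈ g, y < L := by
  induction g with
  | nil => simp
  | cons x xs ih =>
    by_cases hx : x < L
    · simp only [paPop, if_pos hx] at h
      intro y hy
      rcases List.mem_cons.mp hy with rfl | hy
      · exact hx
      · exact ih h y hy
    · simp [paPop, hx] at h

theorem paPop_some {L : Int} {g g' : List Int} (h : paPop L g = some g') :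
    g' ≠ [] ∧ g'.Sublist g ∧ (∀ y ∈ g, L ≤ y → y ∈ g') := by
  induction g generalizing g' with
  | nil => simp [paPop] at h
  | cons x xs ih =>
    by_cases hx : x < L
    · simp only [paPop, if_pos hx] at h
      rcases ih h with ⟨h1, h2, h3⟩
      refine ⟨h1, h2.cons _, ?_⟩
      intro y hy hL
      rcases List.mem_cons.mp hy with rfl | hy
      · omega
      · exact h3 y hy hL
    · simp only [paPop, if_neg hx, Option.some.injEq] at h
      subst h
      exact ⟨by simp, List.Sublist.refl _, fun y hy _ => hy⟩

theorem paPop_len_lt {L : Int} {x : Int} {xs g' : List Int} (hx : x < L)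
    (h : paPop L (x :: xs) = some g') : g'.length < (x :: xs).length := by
  simp only [paPop, if_pos hx] at h
  have := (paPop_some h).2.1.length_le
  simp only [List.length_cons]; omega

-- paPopAll facts --------------------------------------------------------------
theorem paPopAll_none {L : Int} {gs : List (List Int)} (h : paPopAll L gs = none) :
    ∃ g ∈ gs, paPop L g = none := by
  induction gs with
  | nil => simp [paPopAll] at h
  | cons g rest ih =>
    rcases hg : paPop L g with _ | g'
    · exact ⟨g, List.mem_cons_self, hg⟩
    · simp only [paPopAll, hg] at h
      rcases hrest : paPopAll L rest with _ | rest'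
      · rcases ih hrest with ⟨g0, hg0, hp⟩
        exact ⟨g0, List.mem_cons_of_mem _ hg0, hp⟩
      · rw [hrest] at h; simp at h

theorem paPopAll_some {L : Int} {gs gs' : List (List Int)} (h : paPopAll L gs = some gs') :
    List.Forall₂ (fun g g' => paPop L g = some g') gs gs' := by
  induction gs generalizing gs' with
  | nil => simp [paPopAll] at h; simp [h]
  | cons g rest ih =>
    rcases hg : paPop L g with _ | g1
    · simp [paPopAll, hg] at h
    · simp only [paPopAll, hg] at h
      rcases hrest : paPopAll L rest with _ | rest'
      · rw [hrest] at h; simp at h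
      · rw [hrest] at h
        simp only [Option.some.injEq] at h
        subst h
        exact List.Forall₂.cons hg (ih hrest)

theorem forall2_sum_le {gs gs' : List (List Int)}
    (h : List.Forall₂ (fun g g' => g'.length ≤ g.length) gs gs') :
    (gs'.map List.length).sum ≤ (gs.map List.length).sum := by
  induction h with
  | nil => simp
  | cons hr _ ih => simp only [List.map_cons, List.sum_cons]; omega

theorem paPopAll_sum_le {L : Int} {gs gs' : List (List Int)} (h : paPopAll L gs = some gs') :
    (gs'.map List.length).sum ≤ (gs.map List.length).sum :=
  forall2_sum_le ((paPopAll_some h).imp (fun _ _ hp => (paPop_some hp).2.1.length_le))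

theorem paPopAll_sum_lt {L : Int} {gs gs' : List (List Int)} (h : paPopAll L gs = some gs')
    {gm : List Int} (hm : gm ∈ gs) (hhead : gm.headD 0 < L) (hne : gm ≠ []) :
    (gs'.map List.length).sum < (gs.map List.length).sum := by
  induction gs generalizing gs' with
  | nil => cases hm
  | cons g rest ih =>
    rcases hg : paPop L g with _ | g1
    · simp [paPopAll, hg] at h
    · simp only [paPopAll, hg] at h
      rcases hrest : paPopAll L rest with _ | rest'
      · rw [hrest] at h; simp at h
      · rw [hrest] at h
        simp only [Option.some.injEq] at h
        subst h
        simp only [List.map_cons, List.sum_cons]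
        rcases List.mem_cons.mp hm with rfl | hm
        · -- the shrinking group is the head
          rcases hx : gm with _ | ⟨x, xs⟩
          · exact absurd hx hne
          · subst hx
            simp only [List.headD_cons] at hhead
            have hlt := paPop_len_lt hhead hg
            have := paPopAll_sum_le hrest
            omega
        · have := (paPop_some hg).2.1.length_le
          have := ih hrest hm
          omega

-- the window-advance round preserves Feas --------------------------------------
theorem feas_nonneg {gs : List (List Int)} {tf : Int} (h : Feas gs tf) : 0 ≤ tf := by
  rcases h with ⟨t, ⟨g, hg, _⟩, hall⟩
  rcases hall g hg with ⟨x, _, h1, h2⟩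
  omega

-- With a group all of whose elements are ≥ tmax, every Feas witness lives ≥ tmax - tf.
theorem feas_bounded {gs : List (List Int)} {tf tmax : Int}
    (hh : ∃ h ∈ gs, ∀ y ∈ h, tmax ≤ y) (hf : Feas gs tf) :
    ∃ t, (∃ g ∈ gs, t ∈ g) ∧ tmax ≤ t ∧ ∀ g ∈ gs, ∃ x ∈ g, t - tf ≤ x ∧ x ≤ t ∧ tmax - tf ≤ x := by
  rcases hf with ⟨t, htm, hall⟩
  rcases hh with ⟨h, hhg, hge⟩
  rcases hall h hhg with ⟨xh, hxh, hx1, hx2⟩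
  have htmax : tmax ≤ t := le_trans (hge xh hxh) hx2
  refine ⟨t, htm, htmax, ?_⟩
  intro g hg
  rcases hall g hg with ⟨x, hx, h1, h2⟩
  exact ⟨x, hx, h1, h2, by omega⟩

theorem round_preserves {gs gs' : List (List Int)} {tf tmax : Int}
    (hh : ∃ h ∈ gs, ∀ y ∈ h, tmax ≤ y)
    (h : paPopAll (tmax - tf) gs = some gs') :
    Feas gs tf ↔ Feas gs' tf := by
  have hf2 := paPopAll_some h
  constructor
  · intro hf
    rcases feas_bounded hh hf with ⟨t, ⟨g, hg, htg⟩, htmax, hall⟩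
    have htf := feas_nonneg hf
    rcases forall2_mem_left hf2 hg with ⟨g', hg', hpop⟩
    refine ⟨t, ⟨g', hg', (paPop_some hpop).2.2 t htg (by omega)⟩, ?_⟩
    intro b hb
    rcases forall2_mem_right hf2 hb with ⟨a, ha, hpop'⟩
    rcases hall a ha with ⟨x, hx, h1, h2, h3⟩
    exact ⟨x, (paPop_some hpop').2.2 x hx (by omega), h1, h2⟩
  · rintro ⟨t, ⟨g', hg', htg⟩, hall⟩
    rcases forall2_mem_right hf2 hg' with ⟨g, hg, hpop⟩
    refine ⟨t, ⟨g, hg, (paPop_some hpop).2.1.mem htg⟩, ?_⟩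
    intro a ha
    rcases forall2_mem_left hf2 ha with ⟨b, hb, hpop'⟩
    rcases hall b hb with ⟨x, hx, h1, h2⟩
    exact ⟨x, (paPop_some hpop').2.1.mem hx, h1, h2⟩

theorem round_kills {gs : List (List Int)} {tf tmax : Int}
    (hh : ∃ h ∈ gs, ∀ y ∈ h, tmax ≤ y)
    (h : paPopAll (tmax - tf) gs = none) : ¬ Feas gs tf := by
  intro hf
  rcases paPopAll_none h with ⟨g0, hg0, hnone⟩
  rcases feas_bounded hh hf with ⟨t, _, _, hall⟩
  rcases hall g0 hg0 with ⟨x, hx, _, _, h3⟩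
  have := paPop_none hnone x hx
  omega

-- winning round ---------------------------------------------------------------
theorem round_wins {gs : List (List Int)} {tf tmin tmax : Int}
    (hne : ∀ g ∈ gs, g ≠ [])
    (hmin : PySem.List.min? (gs.map (fun g => g.headD 0)) (fun x => x) = some tmin)
    (hmax : PySem.List.max? (gs.map (fun g => g.headD 0)) (fun x => x) = some tmax)
    (hwin : tmax ≤ tmin + tf) : Feas gs tf := by
  have hmem := PySem.List.max?_mem hmax
  rcases List.mem_map.mp hmem with ⟨h, hhg, hhead⟩
  have hlo := PySem.List.min?_isMin hmin
  have hhi := PySem.List.max?_isMax hmax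
  refine ⟨tmax, ⟨h, hhg, ?_⟩, ?_⟩
  · rcases hx : h with _ | ⟨a, as⟩
    · exact absurd hx (hne h hhg)
    · subst hx; simp only [List.headD_cons] at hhead; rw [← hhead]; exact List.mem_cons_self
  · intro g hg
    have hmemg : g.headD 0 ∈ gs.map (fun g => g.headD 0) := List.mem_map.mpr ⟨g, hg, rfl⟩
    have h1 := hlo _ hmemg
    have h2 := hhi _ hmemg
    rcases hx : g with _ | ⟨a, as⟩
    · exact absurd hx (hne g hg)
    · subst hx
      simp only [List.headD_cons] at h1 h2 ⊢
      exact ⟨a, List.mem_cons_self, by omega, by omega⟩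

-- the tmax group bounds all its elements (it is sorted) ------------------------
theorem tmax_group {gs : List (List Int)} {tmax : Int}
    (hne : ∀ g ∈ gs, g ≠ []) (hsort : ∀ g ∈ gs, g.Pairwise (· ≤ ·))
    (hmax : PySem.List.max? (gs.map (fun g => g.headD 0)) (fun x => x) = some tmax) :
    ∃ h ∈ gs, ∀ y ∈ h, tmax ≤ y := by
  rcases List.mem_map.mp (PySem.List.max?_mem hmax) with ⟨h, hhg, hhead⟩
  refine ⟨h, hhg, ?_⟩
  rcases hx : h with _ | ⟨a, as⟩
  · exact absurd hx (hne h hhg)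
  · subst hx
    simp only [List.headD_cons] at hhead
    subst hhead
    intro y hy
    rcases List.mem_cons.mp hy with rfl | hy
    · omega
    · exact List.rel_of_pairwise_cons (hsort _ hhg) hy

-- main loop invariant ----------------------------------------------------------
theorem paLoop_eq_feas (tf : Int) (fuel : Nat) :
    ∀ gs : List (List Int), gs ≠ [] → (∀ g ∈ gs, g ≠ []) → (∀ g ∈ gs, g.Pairwise (· ≤ ·)) →
    (gs.map List.length).sum < fuel →
    (paLoop tf fuel gs = true ↔ Feas gs tf) := by
  induction fuel with
  | zero => intro gs _ _ _ hlt; omega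
  | succ fuel ih =>
    intro gs hgs hne hsort hlt
    have hfr : gs.map (fun g => g.headD 0) ≠ [] := by
      intro h; exact hgs (List.map_eq_nil_iff.mp h)
    rcases hmin : PySem.List.min? (gs.map (fun g => g.headD 0)) (fun x => x) with _ | tmin
    · exact absurd ((PySem.List.min?_eq_none_iff _ _).mp hmin) hfr
    rcases hmax : PySem.List.max? (gs.map (fun g => g.headD 0)) (fun x => x) with _ | tmax
    · exact absurd ((PySem.List.max?_eq_none_iff _ _).mp hmax) hfr
    simp only [paLoop, hmin, hmax]
    by_cases hwin : tmax ≤ tmin + tf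
    · simp only [if_pos hwin, true_iff]
      exact round_wins hne hmin hmax hwin
    · simp only [if_neg hwin]
      have hh := tmax_group hne hsort hmax
      rcases hpop : paPopAll (tmax - tf) gs with _ | gs'
      · exact iff_of_false (by simp) (round_kills hh hpop)
      · have hf2 := paPopAll_some hpop
        -- the min-front group strictly shrinks, so the sum strictly decreases
        rcases List.mem_map.mp (PySem.List.min?_mem hmin) with ⟨gm, hgm, hheadm⟩
        have hlt' : (gs'.map List.length).sum < (gs.map List.length).sum := by
          refine paPopAll_sum_lt hpop hgm ?_ (hne gm hgm)
          rw [hheadm]; omega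
        have hne' : ∀ g' ∈ gs', g' ≠ [] := by
          intro g' hg'
          rcases forall2_mem_right hf2 hg' with ⟨g, _, hpopg⟩
          exact (paPop_some hpopg).1
        have hsort' : ∀ g' ∈ gs', g'.Pairwise (· ≤ ·) := by
          intro g' hg'
          rcases forall2_mem_right hf2 hg' with ⟨g, hg, hpopg⟩
          exact List.Pairwise.sublist (paPop_some hpopg).2.1 (hsort g hg)
        have hgs' : gs' ≠ [] := by
          intro h; subst h
          cases hf2 <;> simp_all
        rw [ih gs' hgs' hne' hsort' (by omega)]
        exact (round_preserves hh hpop).symm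

-- ===== VERDICT (by name: the statement is the Claim_ definition above) =====
theorem within_any_spec : Claim_equal_within_any := by
  intro events tf _ hpre
  unfold Spec_within_any
  rw [Bool.eq_iff_iff, alt_iff_feas]
  unfold within_any
  rcases hs : paSortGroups events with _ | gs
  · -- some group is empty; both sides are False
    rcases paSortGroups_none hs with ⟨g, hg, he⟩
    refine iff_of_false (by simp) ?_
    rintro ⟨t, -, hall⟩
    rcases hall g hg with ⟨x, hx, -⟩
    subst he; cases hx
  · have hf2 := paSortGroups_some hs
    have hgs : gs ≠ [] := by
      intro h; subst h
      cases hf2; exact hpre rfl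
    have hne : ∀ g ∈ gs, g ≠ [] := fun g hg => by
      rcases forall2_mem_right hf2 hg with ⟨e, _, _, hne, _⟩; exact hne
    have hsort : ∀ g ∈ gs, g.Pairwise (· ≤ ·) := fun g hg => by
      rcases forall2_mem_right hf2 hg with ⟨e, _, _, _, hp⟩; exact hp
    rw [paLoop_eq_feas tf _ gs hgs hne hsort (by omega)]
    exact (feas_of_forall2_mem (hf2.imp (fun _ _ h => h.1))).symm
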